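-- pv_equiv track=rewrite | github.com/MKohaku1310/PYTHON-PTIT | PY01011.py | check
-- ===== SOURCE A (Python) =====
-- def check(n):
--     s = str(n)
--     if len(s) % 2 != 0: return False
--     if s != s[::-1]: return False
--     for ch in s:
--         if ch not in '02468':
--             return False
--     return True
-- ===== SOURCE B (Python) =====
-- def check(n):
--     s = str(n)
--     L = len(s)
--     if L % 2 != 0:
--         return False
--     for i in range(L // 2):
--         if s[i] != s[L - 1 - i] or s[i] not in '02468':
--             return False
--     return True
-- ===== Notes on version B (the rewrite author's own statement) =====
-- stated objective: alternative
-- what changed: A's three separate full scans of str(n) (build the reversal, compare whole strings, then a per-character even-digit loop) are merged into a single half-length two-pointer pass that checks mirror equality and even digit together and stops at the first failure.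
import Mathlib
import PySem

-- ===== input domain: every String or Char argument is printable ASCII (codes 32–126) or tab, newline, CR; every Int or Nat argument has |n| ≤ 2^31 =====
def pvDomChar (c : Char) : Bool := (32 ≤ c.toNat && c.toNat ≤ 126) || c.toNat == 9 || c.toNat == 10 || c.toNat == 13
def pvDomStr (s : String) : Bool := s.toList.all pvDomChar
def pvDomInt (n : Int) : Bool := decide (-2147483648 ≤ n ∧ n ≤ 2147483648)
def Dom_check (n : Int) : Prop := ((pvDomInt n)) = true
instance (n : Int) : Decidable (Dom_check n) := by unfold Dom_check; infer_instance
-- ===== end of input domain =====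

-- B merges A's three scans (reverse+compare, then even-digit loop) into one half-length
-- two-pointer pass; same value on every Int (objective: alternative structure).
-- Both ports work over str(n) as a List Char (PySem.Int.toChars), which is exact.

-- ===== PORT A =====
def pvEvens : List Char := ['0', '2', '4', '6', '8']

def check (n : Int) : Bool :=
  let s := PySem.Int.toChars n
  if s.length % 2 ≠ 0 then false
  else if s ≠ (PySem.List.slice? s none none (-1)).getD [] then false  -- s != s[::-1]
  else s.all (fun ch => ch ∈ pvEvens)  -- for ch in s: if ch not in '02468': return False

-- ===== PORT B =====
-- the loop 'for i in range(L//2)' with early return, as recursion on the remaining count k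
def pvHalfLoop (s : List Char) (L : Nat) : Nat → Nat → Bool
  | _, 0 => true
  | i, k + 1 =>
      if s.getD i ' ' ≠ s.getD (L - 1 - i) ' ' ∨ s.getD i ' ' ∉ pvEvens then false
      else pvHalfLoop s L (i + 1) k

def check_alt (n : Int) : Bool :=
  let s := PySem.Int.toChars n
  let L := s.length
  if L % 2 ≠ 0 then false
  else pvHalfLoop s L 0 (L / 2)

-- ===== PRECONDITION & SPEC =====
def Spec_check (n : Int) (out : Bool) : Prop := out = check_alt n
instance (n : Int) (out : Bool) : Decidable (Spec_check n out) := by unfold Spec_check; infer_instance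

-- ===== CLAIM (what is proved, stated in full; the proofs are below) =====
def Claim_equal_check : Prop := ∀ (n : Int), Dom_check n → Spec_check n (check n)

-- ===== LEMMAS AND PROOFS =====

-- the half-loop returns true iff every remaining index satisfies the two-pointer condition
theorem pvHalfLoop_iff (s : List Char) (L : Nat) (i k : Nat) :
    pvHalfLoop s L i k = true ↔
      ∀ j, j < k → s.getD (i + j) ' ' = s.getD (L - 1 - (i + j)) ' ' ∧ s.getD (i + j) ' ' ∈ pvEvens := by
  induction k generalizing i with
  | zero => simp [pvHalfLoop]
  | succ k ih =>
    rw [pvHalfLoop]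
    split_ifs with h
    · simp only [false_iff]
      intro hall
      have h0 := hall 0 (Nat.succ_pos k)
      simp only [Nat.add_zero] at h0
      rcases h with h | h
      · exact h h0.1
      · exact h h0.2
    · rw [ih]
      push Not at h
      constructor
      · intro hall j hj
        cases j with
        | zero => simpa only [Nat.add_zero] using h
        | succ j =>
          have e : i + (j + 1) = (i + 1) + j := by omega
          rw [e]
          exact hall j (by omega)
      · intro hall j hj
        have e : (i + 1) + j = i + (j + 1) := by omega
        rw [e]
        exact hall (j + 1) (by omega)

-- main equivalence over an arbitrary even-length character list
theorem pv_main (l : List Char) (hL : l.length % 2 = 0) :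
    ((!decide (l ≠ l.reverse)) && l.all (fun ch => decide (ch ∈ pvEvens)))
      = pvHalfLoop l l.length 0 (l.length / 2) := by
  rcases Bool.eq_false_or_eq_true (pvHalfLoop l l.length 0 (l.length / 2)) with hh | hh
  · -- half loop succeeds: both full conditions follow from the first-half ones
    rw [hh]
    rw [pvHalfLoop_iff] at hh
    simp only [Nat.zero_add] at hh
    have hfull : ∀ i (hi : i < l.length), l[i] = l[l.length - 1 - i] ∧ l[i] ∈ pvEvens := by
      intro i hi
      by_cases hhalf : i < l.length / 2
      · have := hh i hhalf
        rw [List.getD_eq_getElem l ' ' hi,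
            List.getD_eq_getElem l ' ' (by omega : l.length - 1 - i < l.length)] at this
        exact this
      · have hi' : l.length - 1 - i < l.length / 2 := by omega
        have := hh (l.length - 1 - i) hi'
        have hb1 : l.length - 1 - i < l.length := by omega
        have hb2 : l.length - 1 - (l.length - 1 - i) = i := by omega
        rw [List.getD_eq_getElem l ' ' hb1, hb2, List.getD_eq_getElem l ' ' hi] at this
        exact ⟨this.1.symm, by rw [← this.1]; exact this.2⟩
    have hpal : l = l.reverse := by
      apply List.ext_getElem (by simp)
      intro i h1 h2
      rw [List.getElem_reverse]
      exact (hfull i h1).1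
    have hall : l.all (fun ch => decide (ch ∈ pvEvens)) = true := by
      rw [List.all_eq_true]
      intro c hc
      obtain ⟨i, hi, rfl⟩ := List.getElem_of_mem hc
      simpa using (hfull i hi).2
    rw [hall, Bool.and_true, decide_eq_false (not_not.mpr hpal), Bool.not_false]
  · -- half loop fails: extract the bad index
    rw [hh, Bool.and_eq_false_iff]
    by_cases hpal : l = l.reverse
    · right
      rw [List.all_eq_false]
      have hnot : ¬ ∀ j, j < l.length / 2 →
          l.getD (0 + j) ' ' = l.getD (l.length - 1 - (0 + j)) ' ' ∧ l.getD (0 + j) ' ' ∈ pvEvens := by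
        intro hc
        rw [← pvHalfLoop_iff] at hc
        rw [hc] at hh
        cases hh
      push Not at hnot
      obtain ⟨j, hj, hbad⟩ := hnot
      simp only [Nat.zero_add] at hbad
      have hjlen : j < l.length := by omega
      have hgd : l.getD j ' ' = l[j] := List.getD_eq_getElem l ' ' hjlen
      have hmlen : l.length - 1 - j < l.length := by omega
      have hgd2 : l.getD (l.length - 1 - j) ' ' = l[l.length - 1 - j] :=
        List.getD_eq_getElem l ' ' hmlen
      have hq : l[j]? = l.reverse[j]? := by rw [← hpal]
      rw [List.getElem?_reverse hjlen] at hq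
      have hmirror : l[j] = l[l.length - 1 - j] := by
        rw [List.getElem?_eq_getElem hjlen, List.getElem?_eq_getElem hmlen] at hq
        exact Option.some.inj hq
      have heq : l.getD j ' ' = l.getD (l.length - 1 - j) ' ' := by rw [hgd, hgd2, hmirror]
      have hnotev : l.getD j ' ' ∉ pvEvens := by
        by_contra hev
        exact hbad heq hev
      exact ⟨l[j], List.getElem_mem hjlen, by rw [hgd] at hnotev; simpa using hnotev⟩
    · left
      simp [hpal]

-- ===== VERDICT (by name: the statement is the Claim_ definition above) =====
theorem check_spec : Claim_equal_check := by
  intro n _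
  unfold Spec_check check check_alt
  simp only [PySem.List.slice?_none_none_neg_one, Option.getD_some]
  by_cases hpar : (PySem.Int.toChars n).length % 2 = 0
  · have h2 : ¬ (PySem.Int.toChars n).length % 2 ≠ 0 := not_not.mpr hpar
    rw [if_neg h2, if_neg h2]
    have hm := pv_main (PySem.Int.toChars n) hpar
    by_cases hpal : PySem.Int.toChars n = (PySem.Int.toChars n).reverse
    · rw [if_neg (not_not.mpr hpal)]
      rw [decide_eq_false (not_not.mpr hpal), Bool.not_false, Bool.true_and] at hm
      exact hm
    · rw [if_pos hpal]
      rw [decide_eq_true hpal, Bool.not_true, Bool.false_and] at hm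
      exact hm
  · rw [if_pos hpar, if_pos hpar]
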